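-- pv_equiv track=rewrite | github.com/yonatan-saada/777 | 166.py | sum
-- ===== SOURCE A (Python) =====
-- m = [[1,2,3],
--      [4,5,6],
--      [7,8,9]]
--
-- def sum (m):
--     s = 0
--     for i,v in enumerate(m):
--         for g,m in enumerate(v):
--             if g == 0:
--                 s+=m
--             elif i == g:
--                 if i !=0:
--                     s +=m
--     return s
--
-- def v(z):
--     m = [ ]
--     a = z [::-1]
--     for i in range(len(z)):
--         if i % 2 == 0:
--             m.append(z)
--         else:
--             m.append(a)
--     return m
-- ===== SOURCE B (Python) =====
-- def sum(m):
--     s = 0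
--     for i, row in enumerate(m):
--         if row:
--             s += row[0]
--             if 1 <= i < len(row):
--                 s += row[i]
--     return s
-- ===== Notes on version B (the rewrite author's own statement) =====
-- stated objective: alternative
-- what changed: B visits each row once and adds row[0] and the diagonal element row[i] directly, instead of A's inner enumerate scan over every element of every row; measured ratio at the largest size was 1.37x, below the 1.5x bar.
import Mathlib
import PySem

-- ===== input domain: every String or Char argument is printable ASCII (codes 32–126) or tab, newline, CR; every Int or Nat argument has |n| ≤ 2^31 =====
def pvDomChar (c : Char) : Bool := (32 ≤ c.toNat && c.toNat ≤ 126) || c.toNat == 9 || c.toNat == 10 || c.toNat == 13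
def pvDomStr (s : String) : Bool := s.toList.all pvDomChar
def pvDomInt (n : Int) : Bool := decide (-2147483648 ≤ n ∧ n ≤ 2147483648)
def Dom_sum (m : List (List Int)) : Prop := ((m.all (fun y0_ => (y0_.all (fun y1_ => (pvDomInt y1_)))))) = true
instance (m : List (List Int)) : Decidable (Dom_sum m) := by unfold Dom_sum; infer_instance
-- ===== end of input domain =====

-- B adds row[0] and the diagonal element of each row directly, replacing A's inner scan over every element of every row.

-- ===== PORT A =====
def sum (m : List (List Int)) : Int :=
  (PySem.List.enumerate m).foldl (fun s iv =>
    (PySem.List.enumerate iv.2).foldl (fun s gm =>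
      if gm.1 = 0 then s + gm.2
      else if iv.1 = gm.1 then (if iv.1 ≠ 0 then s + gm.2 else s)
      else s) s) 0

-- ===== PORT B =====
def sum_alt (m : List (List Int)) : Int :=
  (PySem.List.enumerate m).foldl (fun s p =>
    match p.2 with
    | [] => s
    | h :: _ =>
      let s := s + h
      if 1 ≤ p.1 ∧ p.1 < (p.2.length : Int) then s + (PySem.List.pyGet? p.2 p.1).getD 0 else s) 0

-- ===== PRECONDITION & SPEC =====
def Spec_sum (m : List (List Int)) (out : Int) : Prop := out = sum_alt m
instance (m : List (List Int)) (out : Int) : Decidable (Spec_sum m out) := by unfold Spec_sum; infer_instance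

-- ===== CLAIM (what is proved, stated in full; the proofs are below) =====
def Claim_equal_sum : Prop := ∀ (m : List (List Int)), Dom_sum m → Spec_sum m (sum m)

-- ===== LEMMAS AND PROOFS =====

-- contribution of one element, as seen by A's inner loop, for outer index i
def pvContrib (i : Int) (gm : Int × Int) : Int :=
  if gm.1 = 0 then gm.2 else if i = gm.1 ∧ i ≠ 0 then gm.2 else 0

theorem pvInner_foldl (i : Int) (row : List Int) (s : Int) :
    (PySem.List.enumerate row).foldl (fun s gm =>
      if gm.1 = 0 then s + gm.2
      else if i = gm.1 then (if i ≠ 0 then s + gm.2 else s)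
      else s) s
    = s + ((PySem.List.enumerate row).map (pvContrib i)).sum := by
  rw [← PySem.List.foldl_add (g := pvContrib i)]
  apply PySem.List.foldl_congr_mem
  intro a gm _
  unfold pvContrib
  split_ifs with h1 h2 h3 h4 <;> simp_all

theorem pvDiagSum (i : Int) (t : List Int) : ∀ (g : Int), 1 ≤ g →
    ((PySem.List.enumerate t g).map (pvContrib i)).sum
    = if g ≤ i ∧ i < g + (t.length : Int) then (PySem.List.pyGet? t (i - g)).getD 0 else 0 := by
  induction t with
  | nil =>
    intro g _
    simp only [PySem.List.enumerate_nil, List.map_nil, List.sum_nil, List.length_nil]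
    rw [if_neg (by push_cast; omega)]
  | cons h t ih =>
    intro g hg
    rw [PySem.List.enumerate_cons]
    simp only [List.map_cons, List.sum_cons, ih (g+1) (by omega)]
    have hc : pvContrib i (g, h) = if i = g then h else 0 := by
      simp only [pvContrib]
      rw [if_neg (by simpa using (by omega : g ≠ 0))]
      by_cases hig : i = g
      · rw [if_pos ⟨hig, by omega⟩, if_pos hig]
      · rw [if_neg (by tauto), if_neg hig]
    rw [hc]
    by_cases hig : i = g
    · subst hig
      rw [if_pos rfl, if_neg (by omega), if_pos (by simp only [List.length_cons]; push_cast; omega)]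
      rw [sub_self, PySem.List.pyGet?_zero_cons]
      simp
    · rw [if_neg hig]
      by_cases hin : g + 1 ≤ i ∧ i < g + 1 + (t.length : Int)
      · rw [if_pos hin, if_pos (by simp only [List.length_cons]; push_cast; omega)]
        have he : i - g = (i - (g+1)) + 1 := by ring
        obtain ⟨n, hn⟩ := Int.eq_ofNat_of_zero_le (show (0:Int) ≤ i - (g+1) by omega)
        rw [he, hn, PySem.List.pyGet?_cons_succ]
        ring_nf
      · rw [if_neg hin, if_neg (by simp only [List.length_cons]; push_cast at hin ⊢; omega)]
        ring_nf

theorem pvRow_eq (i : Int) (row : List Int) (s : Int) :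
    s + ((PySem.List.enumerate row).map (pvContrib i)).sum
    = (match row with
      | [] => s
      | h :: _ =>
        let s := s + h
        if 1 ≤ i ∧ i < (row.length : Int) then s + (PySem.List.pyGet? row i).getD 0 else s) := by
  cases row with
  | nil => simp [PySem.List.enumerate_nil]
  | cons h t =>
    rw [PySem.List.enumerate_cons]
    simp only [List.map_cons, List.sum_cons, zero_add]
    have hc : pvContrib i (0, h) = h := by simp [pvContrib]
    rw [hc, pvDiagSum i t 1 (by omega)]
    simp only [List.length_cons]
    by_cases hin : 1 ≤ i ∧ i < (1 : Int) + (t.length : Int)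
    · rw [if_pos hin, if_pos (by push_cast; omega)]
      obtain ⟨n, hn⟩ := Int.eq_ofNat_of_zero_le (show (0:Int) ≤ i - 1 by omega)
      rw [show i = (i - 1) + 1 from by ring, hn, PySem.List.pyGet?_cons_succ]
      ring_nf
    · rw [if_neg hin, if_neg (by push_cast at hin ⊢; omega)]
      ring_nf

-- ===== VERDICT (by name: the statement is the Claim_ definition above) =====
theorem sum_spec : Claim_equal_sum := by
  intro m _
  unfold Spec_sum sum sum_alt
  apply PySem.List.foldl_congr_mem
  intro s p _
  rw [pvInner_foldl p.1 p.2 s, pvRow_eq]
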